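-- pv_equiv track=rewrite | github.com/HiddenGrizzly/hackathon | translateapp/demo.py | find_videos
-- ===== SOURCE A (Python) =====
-- def find_videos(text, video_list):
--     """Hàm tìm kiếm video theo từ khóa."""
--     words = text.split()
--     found_videos = []
--     for word in words:
--         for video in video_list:
--             if word.lower() in video.lower():
--                 found_videos.append(video)
--                 break
--     return found_videos
-- ===== SOURCE B (Python) =====
-- def find_videos(text, video_list):
--     """Index pass: assign each distinct lowered word its first matching video, then look up."""
--     words = text.split()
--     distinct = list(dict.fromkeys(w.lower() for w in words))
--     index = {}
--     for video in video_list: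
--         vlow = video.lower()
--         for w in distinct:
--             if w not in index and w in vlow:
--                 index[w] = video
--     return [index[w.lower()] for w in words if w.lower() in index]
-- ===== Notes on version B (the rewrite author's own statement) =====
-- stated objective: faster
-- what changed: Replaces A's per-word rescan of video_list with a single outer pass over videos that builds a word->first-video dict over the distinct lowered words, followed by a lookup pass over the original word sequence.
import Mathlib
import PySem

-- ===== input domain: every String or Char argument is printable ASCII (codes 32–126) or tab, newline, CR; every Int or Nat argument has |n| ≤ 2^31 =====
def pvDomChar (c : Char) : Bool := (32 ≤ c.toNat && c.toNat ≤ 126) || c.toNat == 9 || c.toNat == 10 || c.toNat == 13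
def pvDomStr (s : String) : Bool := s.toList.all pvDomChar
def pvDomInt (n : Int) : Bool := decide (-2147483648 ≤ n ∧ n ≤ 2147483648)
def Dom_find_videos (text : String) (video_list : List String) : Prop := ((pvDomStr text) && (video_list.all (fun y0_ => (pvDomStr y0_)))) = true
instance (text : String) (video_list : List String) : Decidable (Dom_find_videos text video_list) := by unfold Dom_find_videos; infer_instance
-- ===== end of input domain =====

-- B is an alternative algorithm: one indexing pass over videos building a dict over distinct lowered words, then a lookup pass.

-- ===== PORT A =====
-- inner loop of A: scan video_list, append the first video containing word.lower(), then break
def pvInnerA (word : String) : List String → Option String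
  | [] => none
  | v :: vs =>
      if PySem.Str.isIn (PySem.Str.lower word) (PySem.Str.lower v) then some v
      else pvInnerA word vs

def find_videos (text : String) (video_list : List String) : List String :=
  (PySem.Str.split₀ text).foldl
    (fun found_videos word =>
      match pvInnerA word video_list with
      | some v => found_videos ++ [v]
      | none => found_videos)
    []

-- ===== PORT B =====
-- index = {}; for video: for w in distinct: if w not in index and w in vlow: index[w] = video
def pvIndexB (distinct : List String) (video_list : List String) : PySem.Dict String String :=
  video_list.foldl
    (fun index video =>
      distinct.foldl
        (fun index w =>
          if !(index.contains w) && PySem.Str.isIn w (PySem.Str.lower video) then index.insert w video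
          else index)
        index)
    PySem.Dict.empty

def find_videos_alt (text : String) (video_list : List String) : List String :=
  let words := PySem.Str.split₀ text
  let distinct := PySem.List.dedup (words.map PySem.Str.lower)
  let index := pvIndexB distinct video_list
  words.filterMap (fun w => index.get? (PySem.Str.lower w))

-- ===== PRECONDITION & SPEC =====
def Spec_find_videos (text : String) (video_list : List String) (out : List String) : Prop := out = find_videos_alt text video_list
instance (text : String) (video_list : List String) (out : List String) : Decidable (Spec_find_videos text video_list out) := by unfold Spec_find_videos; infer_instance

-- ===== CLAIM (what is proved, stated in full; the proofs are below) =====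
def Claim_equal_find_videos : Prop := ∀ (text : String) (video_list : List String), Dom_find_videos text video_list → Spec_find_videos text video_list (find_videos text video_list)

-- ===== LEMMAS AND PROOFS =====

-- A's accumulating loop is the filterMap of its inner loop
theorem pvA_foldl_filterMap (vl : List String) (ws : List String) (acc : List String) :
    ws.foldl (fun found_videos word =>
        match pvInnerA word vl with
        | some v => found_videos ++ [v]
        | none => found_videos) acc
      = acc ++ ws.filterMap (fun w => pvInnerA w vl) := by
  induction ws generalizing acc with
  | nil => simp
  | cons w ws ih =>
      simp only [List.foldl_cons, List.filterMap_cons]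
      cases h : pvInnerA w vl <;> simp [ih]

-- the inner word loop of B, on a nodup word list, assigns video to x iff x is unassigned and matches
theorem pvInner_get? (video : String) (distinct : List String) (hnd : distinct.Nodup)
    (d : PySem.Dict String String) (x : String) :
    (distinct.foldl
        (fun index w =>
          if !(index.contains w) && PySem.Str.isIn w (PySem.Str.lower video) then index.insert w video
          else index) d).get? x
      = if x ∈ distinct ∧ d.get? x = none ∧ PySem.Str.isIn x (PySem.Str.lower video) then some video
        else d.get? x := by
  induction distinct generalizing d with
  | nil => simp
  | cons w ws ih =>
      simp only [List.foldl_cons]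
      rcases List.nodup_cons.mp hnd with ⟨hw, hnd'⟩
      by_cases hwx : w = x
      · subst hwx
        by_cases hc : d.contains w
        · have hg : d.get? w ≠ none := by
            intro h
            rw [PySem.Dict.get?_eq_none_iff_contains] at h
            simp [hc] at h
          have hstep : (if !(d.contains w) && PySem.Str.isIn w (PySem.Str.lower video) then d.insert w video else d) = d := by
            simp [hc]
          rw [hstep, ih hnd' d]
          simp [hw, hg]
        · have hg : d.get? w = none := by
            rw [PySem.Dict.get?_eq_none_iff_contains]; simpa using hc
          by_cases hin : PySem.Chars.isIn w.toList (PySem.Chars.lower video.toList) = true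
          · have hstep : (if !(d.contains w) && PySem.Str.isIn w (PySem.Str.lower video) then d.insert w video else d) = d.insert w video := by
              simp [hc, hin]
            rw [hstep, ih hnd' _]
            simp [hw, hg, hin, PySem.Dict.get?_insert_self]
          · have hstep : (if !(d.contains w) && PySem.Str.isIn w (PySem.Str.lower video) then d.insert w video else d) = d := by
              simp [hin]
            rw [hstep, ih hnd' d]
            simp [hin]
      · have hstep : ∀ d' : PySem.Dict String String,
            ((if !(d'.contains w) && PySem.Str.isIn w (PySem.Str.lower video) then d'.insert w video
              else d') : PySem.Dict String String).get? x = d'.get? x := by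
          intro d'
          split_ifs with h
          · exact PySem.Dict.get?_insert_of_ne _ _ (fun h' => hwx h'.symm)
          · rfl
        rw [ih hnd' _]
        have hxw : x ≠ w := fun h => hwx h.symm
        simp only [hstep]
        simp [hxw]

-- B-side characterisation: the first video (in list order) whose lowered form contains x
def pvFirst (x : String) : List String → Option String
  | [] => none
  | v :: vs => if PySem.Str.isIn x (PySem.Str.lower v) then some v else pvFirst x vs

-- A's inner loop is pvFirst applied to the lowered word
theorem pvInnerA_eq_pvFirst (word : String) (vl : List String) :
    pvInnerA word vl = pvFirst (PySem.Str.lower word) vl := by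
  induction vl with
  | nil => rfl
  | cons v vs ih => simp only [pvInnerA, pvFirst, ih]

-- the full index build: lookup x = first matching video (x among the distinct words)
theorem pvIndex_get? (distinct : List String) (hnd : distinct.Nodup) (vl : List String)
    (d : PySem.Dict String String) (x : String) (hx : x ∈ distinct) :
    (vl.foldl
        (fun index video =>
          distinct.foldl
            (fun index w =>
              if !(index.contains w) && PySem.Str.isIn w (PySem.Str.lower video) then index.insert w video
              else index) index) d).get? x
      = match d.get? x with
        | some r => some r
        | none => pvFirst x vl := by
  induction vl generalizing d with
  | nil =>
      simp only [List.foldl_nil]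
      cases d.get? x <;> rfl
  | cons v vs ih =>
      simp only [List.foldl_cons]
      rw [ih _]
      rw [pvInner_get? v distinct hnd d x]
      cases hd : d.get? x with
      | some r => simp
      | none =>
          by_cases hin : PySem.Str.isIn x (PySem.Str.lower v)
          · simp only [PySem.Str.isIn_eq, PySem.Str.toList_lower] at hin
            simp [hx, pvFirst, hin]
          · simp only [PySem.Str.isIn_eq, PySem.Str.toList_lower] at hin
            simp [hx, pvFirst, hin]

theorem find_videos_spec : Claim_equal_find_videos := by
  intro text vl _
  unfold Spec_find_videos find_videos find_videos_alt
  rw [pvA_foldl_filterMap vl _ []]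
  simp only [List.nil_append]
  apply List.filterMap_congr
  intro w hw
  rw [pvInnerA_eq_pvFirst]
  unfold pvIndexB
  rw [pvIndex_get? _ (PySem.List.nodup_dedup _) vl PySem.Dict.empty _
      (by rw [PySem.List.mem_dedup]; exact List.mem_map_of_mem hw)]
  simp [PySem.Dict.get?_empty]
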